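-- pv_equiv track=rewrite | github.com/rebornix/sounds-gucci | scripts/langfuse-hook.py | split_events_by_prompt
-- ===== SOURCE A (Python) =====
-- def split_events_by_prompt(events):
--     """Split events into segments, one per user.message (fallback)."""
--     segments = []
--     current = []
--     for event in events:
--         if event.get("type") == "user.message" and current:
--             segments.append(current)
--             current = []
--         current.append(event)
--     if current:
--         segments.append(current)
--     return segments
-- ===== SOURCE B (Python) =====
-- def split_events_by_prompt(events):
--     """Split events into segments, one per user.message (fallback)."""
--     if not events:
--         return []
--     k = 1
--     while k < len(events) and events[k].get("type") != "user.message":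
--         k += 1
--     return [events[:k]] + split_events_by_prompt(events[k:])
-- ===== Notes on version B (the rewrite author's own statement) =====
-- stated objective: alternative
-- what changed: B finds the next user.message boundary by scanning for a cut index and recurses on the remaining slice, instead of A's single pass accumulating a running 'current' segment list.
import Mathlib
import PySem

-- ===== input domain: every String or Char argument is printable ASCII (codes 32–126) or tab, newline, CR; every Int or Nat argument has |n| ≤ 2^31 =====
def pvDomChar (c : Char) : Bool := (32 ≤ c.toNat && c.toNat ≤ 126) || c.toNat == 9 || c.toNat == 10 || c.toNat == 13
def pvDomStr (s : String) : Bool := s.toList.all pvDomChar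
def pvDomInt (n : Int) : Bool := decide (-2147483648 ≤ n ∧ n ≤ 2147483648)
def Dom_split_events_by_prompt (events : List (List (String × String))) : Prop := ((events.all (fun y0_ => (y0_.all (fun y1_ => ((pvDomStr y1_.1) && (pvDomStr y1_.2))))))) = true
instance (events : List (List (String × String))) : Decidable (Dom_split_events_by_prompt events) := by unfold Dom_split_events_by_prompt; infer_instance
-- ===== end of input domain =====

-- B splits by scanning for the next user.message cut index and recursing on the tail slice,
-- instead of A's accumulator pass; same cost, different decomposition (objective: alternative).

-- event.get("type") == "user.message": first-match lookup in the association list (exact for Python dicts)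
def pvIsBoundary (event : List (String × String)) : Bool :=
  (PySem.Dict.mk event).get? "type" == some "user.message"

-- ===== PORT A =====
-- literal port of A's loop: state (segments, current), then the trailing 'if current' append
-- the loop body of A's for-loop, as a named step function over the state (segments, current)
def pvStepA (p : List (List (List (String × String))) × List (List (String × String)))
    (event : List (String × String)) :
    List (List (List (String × String))) × List (List (String × String)) :=
  let p' := if pvIsBoundary event && !p.2.isEmpty then (p.1 ++ [p.2], ([] : List (List (String × String)))) else p
  (p'.1, p'.2 ++ [event])

def split_events_by_prompt (events : List (List (String × String))) : List (List (List (String × String))) :=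
  let st := events.foldl pvStepA ([], [])
  if !st.2.isEmpty then st.1 ++ [st.2] else st.1

-- ===== PORT B =====
-- Source B: the while loop advancing k over non-boundary events is exactly takeWhile on the tail;
-- events[:k] = events[0] :: that prefix, events[k:] = the corresponding dropWhile.
def split_events_by_prompt_alt (events : List (List (String × String))) : List (List (List (String × String))) :=
  match events with
  | [] => []
  | e :: es =>
      (e :: es.takeWhile (fun x => !pvIsBoundary x)) ::
        split_events_by_prompt_alt (es.dropWhile (fun x => !pvIsBoundary x))
termination_by events.length
decreasing_by
  simpa using Nat.lt_succ_of_le (List.length_dropWhile_le _ _)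

-- ===== PRECONDITION & SPEC =====
def Spec_split_events_by_prompt (events : List (List (String × String))) (out : List (List (List (String × String)))) : Prop := out = split_events_by_prompt_alt events
instance (events : List (List (String × String))) (out : List (List (List (String × String)))) : Decidable (Spec_split_events_by_prompt events out) := by unfold Spec_split_events_by_prompt; infer_instance

-- ===== CLAIM (what is proved, stated in full; the proofs are below) =====
def Claim_equal_split_events_by_prompt : Prop := ∀ (events : List (List (String × String))), Dom_split_events_by_prompt events → Spec_split_events_by_prompt events (split_events_by_prompt events)

-- ===== LEMMAS AND PROOFS =====

-- invariant: with a nonempty current segment, finishing A's loop yields the segments so far,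
-- then the current segment extended to the next boundary, then B's split of the rest
theorem pvLoopA_eq (es : List (List (String × String))) :
    ∀ (segs : List (List (List (String × String)))) (cur : List (List (String × String))),
    cur ≠ [] →
    (let st := es.foldl pvStepA (segs, cur);
     if !st.2.isEmpty then st.1 ++ [st.2] else st.1)
    = segs ++ (cur ++ es.takeWhile (fun x => !pvIsBoundary x)) ::
        split_events_by_prompt_alt (es.dropWhile (fun x => !pvIsBoundary x)) := by
  induction es with
  | nil =>
      intro segs cur hcur
      simp [split_events_by_prompt_alt, hcur]
  | cons e es ih =>
      intro segs cur hcur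
      by_cases hb : pvIsBoundary e
      · have h1 : pvStepA (segs, cur) e = (segs ++ [cur], [e]) := by
          simp [pvStepA, hb, hcur]
        simp only [List.foldl_cons, h1]
        rw [ih (segs ++ [cur]) [e] (by simp)]
        simp [split_events_by_prompt_alt, hb, List.takeWhile, List.dropWhile]
      · have h1 : pvStepA (segs, cur) e = (segs, cur ++ [e]) := by
          simp [pvStepA, hb]
        simp only [List.foldl_cons, h1]
        rw [ih segs (cur ++ [e]) (by simp)]
        simp [List.takeWhile, List.dropWhile, hb]

-- ===== VERDICT (by name: the statement is the Claim_ definition above) =====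
theorem split_events_by_prompt_spec : Claim_equal_split_events_by_prompt := by
  intro events _
  show split_events_by_prompt events = split_events_by_prompt_alt events
  cases events with
  | nil => simp [split_events_by_prompt, split_events_by_prompt_alt]
  | cons e es =>
      have h0 : pvStepA ([], []) e = ([], [e]) := by
        simp [pvStepA]
      have : split_events_by_prompt (e :: es)
          = (let st := es.foldl pvStepA ([], [e]);
             if !st.2.isEmpty then st.1 ++ [st.2] else st.1) := by
        simp only [split_events_by_prompt, List.foldl_cons]
        rw [h0]
      rw [this, pvLoopA_eq es [] [e] (by simp)]
      simp [split_events_by_prompt_alt]
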